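-- pv_equiv track=rewrite | github.com/camlab-bioml/rakaia | ccramic/app/parsers.py | create_new_blending_dict
-- ===== SOURCE A (Python) =====
-- def create_new_blending_dict(uploaded):
--     """
--     Create a new blending/config dictionary from an uploaded dictionary
--     """
--     current_blend_dict = {}
--     for exp in uploaded.keys():
--         if "metadata" not in exp:
--             current_blend_dict[exp] = {}
--             for slide in uploaded[exp].keys():
--                 current_blend_dict[exp][slide] = {}
--                 for acq in uploaded[exp][slide].keys():
--                     current_blend_dict[exp][slide][acq] = {}
--                     for channel in uploaded[exp][slide][acq].keys():
--                         current_blend_dict[exp][slide][acq][channel] = {'color': None,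
--                                                                         'x_lower_bound': None,
--                                                                         'x_upper_bound': None,
--                                                                         'y_ceiling': None,
--                                                                         'filter_type': None,
--                                                                         'filter_val': None}
--                         current_blend_dict[exp][slide][acq][channel]['color'] = '#FFFFFF'
--     return current_blend_dict
-- ===== SOURCE B (Python) =====
-- def create_new_blending_dict(uploaded):
--     """Recursive rebuild: one helper walks the nested dict down to channel depth."""
--     def build(node, depth):
--         if depth == 0:
--             return {'color': '#FFFFFF',
--                     'x_lower_bound': None,
--                     'x_upper_bound': None,
--                     'y_ceiling': None,
--                     'filter_type': None,
--                     'filter_val': None}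
--         return {k: build(v, depth - 1) for k, v in node.items()}
--     return {exp: build(sub, 3) for exp, sub in uploaded.items() if "metadata" not in exp}
-- ===== Notes on version B (the rewrite author's own statement) =====
-- stated objective: simpler
-- what changed: Replaced four explicit nested loops that mutate a result dict level by level with one recursive helper build(node, depth) that emits the leaf template at channel depth, driven by two dict comprehensions.
import Mathlib
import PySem

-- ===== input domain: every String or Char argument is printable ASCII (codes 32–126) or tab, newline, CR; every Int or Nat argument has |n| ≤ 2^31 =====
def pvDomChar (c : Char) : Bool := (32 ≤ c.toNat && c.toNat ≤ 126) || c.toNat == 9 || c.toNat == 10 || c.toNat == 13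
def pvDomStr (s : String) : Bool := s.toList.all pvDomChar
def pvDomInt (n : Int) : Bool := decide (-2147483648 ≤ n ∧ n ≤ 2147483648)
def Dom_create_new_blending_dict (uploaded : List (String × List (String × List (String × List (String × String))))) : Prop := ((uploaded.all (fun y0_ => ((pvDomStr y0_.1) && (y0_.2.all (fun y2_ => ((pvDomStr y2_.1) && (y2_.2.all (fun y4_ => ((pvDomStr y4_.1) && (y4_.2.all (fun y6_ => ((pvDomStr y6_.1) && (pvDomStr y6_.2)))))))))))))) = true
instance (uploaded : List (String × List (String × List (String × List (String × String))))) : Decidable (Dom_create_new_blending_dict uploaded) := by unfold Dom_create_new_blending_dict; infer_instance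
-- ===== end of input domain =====

-- B replaces A's four explicit nested mutating loops with a recursive depth-indexed rebuild
-- (ported level-by-level, since the nesting types differ per level); objective: simpler.


-- ===== PORT A =====
-- the leaf assignment: template with every field None, then ['color'] = '#FFFFFF'
-- (Dict.insert overwrites in place, as Python's dict assignment does)
def pvLeafA : List (String × Option String) :=
  ((PySem.Dict.ofList [("color", (none : Option String)), ("x_lower_bound", none),
      ("x_upper_bound", none), ("y_ceiling", none), ("filter_type", none),
      ("filter_val", none)]).insert "color" (some "#FFFFFF")).items

def create_new_blending_dict (uploaded : List (String × List (String × List (String × List (String × String))))) : List (String × List (String × List (String × List (String × List (String × Option String))))) :=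
  uploaded.foldl (fun current_blend_dict expPair =>
    if !(PySem.Str.isIn "metadata" expPair.1) then
      current_blend_dict ++ [(expPair.1,
        expPair.2.foldl (fun accS slidePair =>
          accS ++ [(slidePair.1,
            slidePair.2.foldl (fun accA acqPair =>
              accA ++ [(acqPair.1,
                acqPair.2.foldl (fun accC chPair =>
                  accC ++ [(chPair.1, pvLeafA)]) [])]) [])]) [])]
    else current_blend_dict) []

-- ===== PORT B =====
-- Source B's recursive build(node, depth): the nesting types differ per level, so the
-- recursion is monomorphised into one helper per depth (build at depth 0..3).
def pvBuild0 : List (String × Option String) :=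
  [("color", some "#FFFFFF"), ("x_lower_bound", none), ("x_upper_bound", none),
   ("y_ceiling", none), ("filter_type", none), ("filter_val", none)]

def pvBuild1 (node : List (String × String)) : List (String × List (String × Option String)) :=
  node.map (fun kv => (kv.1, pvBuild0))

def pvBuild2 (node : List (String × List (String × String))) : List (String × List (String × List (String × Option String))) :=
  node.map (fun kv => (kv.1, pvBuild1 kv.2))

def pvBuild3 (node : List (String × List (String × List (String × String)))) : List (String × List (String × List (String × List (String × Option String)))) :=
  node.map (fun kv => (kv.1, pvBuild2 kv.2))

def create_new_blending_dict_alt (uploaded : List (String × List (String × List (String × List (String × String))))) : List (String × List (String × List (String × List (String × List (String × Option String))))) :=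
  (uploaded.filter (fun kv => !(PySem.Str.isIn "metadata" kv.1))).map
    (fun kv => (kv.1, pvBuild3 kv.2))

-- ===== PRECONDITION & SPEC =====
def Spec_create_new_blending_dict (uploaded : List (String × List (String × List (String × List (String × String))))) (out : List (String × List (String × List (String × List (String × List (String × Option String)))))) : Prop := out = create_new_blending_dict_alt uploaded
instance (uploaded : List (String × List (String × List (String × List (String × String))))) (out : List (String × List (String × List (String × List (String × List (String × Option String)))))) : Decidable (Spec_create_new_blending_dict uploaded out) := by
  unfold Spec_create_new_blending_dict
  -- the nested type is too deep for one-shot synthesis: build DecidableEq level by level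
  haveI h1 : DecidableEq (List (String × Option String)) := inferInstance
  haveI h2 : DecidableEq (List (String × List (String × Option String))) := inferInstance
  haveI h3 : DecidableEq (List (String × List (String × List (String × Option String)))) := inferInstance
  haveI h4 : DecidableEq (List (String × List (String × List (String × List (String × Option String))))) := inferInstance
  haveI h5 : DecidableEq (List (String × List (String × List (String × List (String × List (String × Option String)))))) := inferInstance
  infer_instance

-- ===== CLAIM (what is proved, stated in full; the proofs are below) =====
def Claim_equal_create_new_blending_dict : Prop := ∀ (uploaded : List (String × List (String × List (String × List (String × String))))), Dom_create_new_blending_dict uploaded → Spec_create_new_blending_dict uploaded (create_new_blending_dict uploaded)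

-- ===== LEMMAS AND PROOFS =====
theorem pvLeafA_eq : pvLeafA = pvBuild0 := by decide

theorem channels_eq (m : List (String × String)) :
    m.foldl (fun accC chPair => accC ++ [(chPair.1, pvLeafA)]) [] = pvBuild1 m := by
  simpa [pvBuild1, pvLeafA_eq] using
    PySem.List.foldl_append_singleton_eq_map (fun chPair : String × String => (chPair.1, pvLeafA)) m []

theorem acqs_eq (m : List (String × List (String × String))) :
    m.foldl (fun accA acqPair => accA ++ [(acqPair.1,
      acqPair.2.foldl (fun accC chPair => accC ++ [(chPair.1, pvLeafA)]) [])]) [] = pvBuild2 m := by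
  simp only [channels_eq]
  simpa [pvBuild2] using
    PySem.List.foldl_append_singleton_eq_map
      (fun acqPair : String × List (String × String) => (acqPair.1, pvBuild1 acqPair.2)) m []

theorem slides_eq (m : List (String × List (String × List (String × String)))) :
    m.foldl (fun accS slidePair => accS ++ [(slidePair.1,
      slidePair.2.foldl (fun accA acqPair => accA ++ [(acqPair.1,
        acqPair.2.foldl (fun accC chPair => accC ++ [(chPair.1, pvLeafA)]) [])]) [])]) [] = pvBuild3 m := by
  simp only [acqs_eq]
  simpa [pvBuild3] using
    PySem.List.foldl_append_singleton_eq_map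
      (fun slidePair : String × List (String × List (String × String)) =>
        (slidePair.1, pvBuild2 slidePair.2)) m []

-- ===== VERDICT (by name: the statement is the Claim_ definition above) =====
theorem create_new_blending_dict_spec : Claim_equal_create_new_blending_dict := by
  intro uploaded _
  unfold Spec_create_new_blending_dict create_new_blending_dict create_new_blending_dict_alt
  simp only [slides_eq]
  simpa using
    PySem.List.foldl_append_if (fun kv : String × List (String × List (String × List (String × String))) =>
      !(PySem.Str.isIn "metadata" kv.1))
      (fun expPair => (expPair.1, pvBuild3 expPair.2)) uploaded []
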